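-- pv_equiv track=rewrite | github.com/zhyanlin/RobusTAD | robustad/clean.py | popOneL0TAD
-- ===== SOURCE A (Python) =====
-- def popOneL0TAD(tads):
--     for tad in tads:
--         nestTADs = []
--         for tad2 in tads:
--             if tad2[0] >= tad[0] and tad2[1] <= tad[1]:
--                 if tad2[0] == tad[0] and tad2[1] == tad[1]:
--                     pass
--                 else:
--                     nestTADs.append(tad2)
--
--         if len(nestTADs) == 0:
--             tads.remove(tad)
--             return tad, tads
-- ===== SOURCE B (Python) =====
-- def popOneL0TAD(tads):
--     # min end per distinct start
--     minEnd = {}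
--     for t in tads:
--         s, e = t[0], t[1]
--         if s not in minEnd or e < minEnd[s]:
--             minEnd[s] = e
--     # suffix[s] = min end over starts strictly greater than s (None if no such start)
--     suffix = {}
--     run = None
--     for s in sorted(minEnd, reverse=True):
--         suffix[s] = run
--         if run is None or minEnd[s] < run:
--             run = minEnd[s]
--     for t in tads:
--         s, e = t[0], t[1]
--         nested = minEnd[s] < e or (suffix[s] is not None and suffix[s] <= e)
--         if not nested:
--             tads.remove(t)
--             return t, tads
-- ===== Notes on version B (the rewrite author's own statement) =====
-- stated objective: alternative
-- what changed: B replaces A's quadratic all-pairs containment scan by one pass building a per-start minimum-end dict, a suffix-minimum pass over the descending-sorted starts, and then picks the first TAD in input order whose two O(1) lookups report no strictly nested TAD; intended asymptotically faster (a timing run read ~1.7x at the largest size but not consistently >=1.5x, so no speed is claimed).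
-- outside the precondition, e.g. on popOneL0TAD([[10, 11], [5]]): A returns ([10, 11], [[5]]), B raises IndexError
import Mathlib
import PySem

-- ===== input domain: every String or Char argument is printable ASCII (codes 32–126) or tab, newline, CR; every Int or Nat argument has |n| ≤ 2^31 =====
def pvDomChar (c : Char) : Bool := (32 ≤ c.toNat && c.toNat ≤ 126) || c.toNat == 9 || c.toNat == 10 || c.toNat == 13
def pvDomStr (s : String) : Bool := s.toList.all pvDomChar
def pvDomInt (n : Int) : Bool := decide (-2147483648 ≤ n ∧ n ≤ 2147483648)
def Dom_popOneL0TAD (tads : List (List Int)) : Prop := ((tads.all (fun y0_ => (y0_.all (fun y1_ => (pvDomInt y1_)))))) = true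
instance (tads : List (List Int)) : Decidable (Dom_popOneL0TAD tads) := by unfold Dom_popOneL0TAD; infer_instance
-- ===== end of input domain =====

-- B replaces A's quadratic nested scan by a per-start minimum-end dict plus a suffix minimum over
-- the descending-sorted starts; both A and B mutate `tads` in place identically (one list.remove
-- before returning) — the equivalence proved here is about the return value.

-- t[0] / t[1] (both Pythons index the same way; the default is never reached inside Pre_)
def pvFst (t : List Int) : Int := (PySem.List.pyGet? t 0).getD 0
def pvSnd (t : List Int) : Int := (PySem.List.pyGet? t 1).getD 0

-- ===== PORT A =====
def pvA_nest (tads : List (List Int)) (tad : List Int) : List (List Int) :=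
  tads.foldl (fun acc tad2 =>
    if pvFst tad2 ≥ pvFst tad ∧ pvSnd tad2 ≤ pvSnd tad then
      if pvFst tad2 = pvFst tad ∧ pvSnd tad2 = pvSnd tad then acc
      else acc ++ [tad2]
    else acc) []

def pvA_loop (tads : List (List Int)) : List (List Int) → Option (List Int × List (List Int))
  | [] => none
  | tad :: rest =>
    if (pvA_nest tads tad).length = 0 then
      some (tad, (PySem.List.remove? tads tad).getD tads)
    else pvA_loop tads rest

def popOneL0TAD (tads : List (List Int)) : Option (List Int × List (List Int)) :=
  pvA_loop tads tads

-- ===== PORT B =====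
def pvB_minEnd (tads : List (List Int)) : PySem.Dict Int Int :=
  tads.foldl (fun d t =>
    if d.contains (pvFst t) = false ∨ pvSnd t < d.getD (pvFst t) 0 then
      d.insert (pvFst t) (pvSnd t)
    else d) PySem.Dict.empty

def pvB_step (minEnd : PySem.Dict Int Int)
    (st : PySem.Dict Int (Option Int) × Option Int) (s : Int) :
    PySem.Dict Int (Option Int) × Option Int :=
  (st.1.insert s st.2,
   match st.2 with
   | none => some (minEnd.getD s 0)
   | some r => if minEnd.getD s 0 < r then some (minEnd.getD s 0) else st.2)

def pvB_suffix (minEnd : PySem.Dict Int Int) : PySem.Dict Int (Option Int) :=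
  ((PySem.List.sorted minEnd.keys (fun x => x) true).foldl (pvB_step minEnd)
    (PySem.Dict.empty, none)).1

def pvB_scan (orig : List (List Int)) (minEnd : PySem.Dict Int Int)
    (suffix : PySem.Dict Int (Option Int)) :
    List (List Int) → Option (List Int × List (List Int))
  | [] => none
  | t :: rest =>
    let s := pvFst t
    let e := pvSnd t
    let nested : Bool := decide (minEnd.getD s 0 < e) ||
      (match suffix.getD s none with | none => false | some r => decide (r ≤ e))
    if nested then pvB_scan orig minEnd suffix rest
    else some (t, (PySem.List.remove? orig t).getD orig)

def popOneL0TAD_alt (tads : List (List Int)) : Option (List Int × List (List Int)) :=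
  let minEnd := pvB_minEnd tads
  pvB_scan tads minEnd (pvB_suffix minEnd) tads

-- ===== PRECONDITION & SPEC =====
-- Pre_ excludes inputs containing a TAD of fewer than 2 ints: on those both Pythons hit t[0]/t[1]
-- and raise IndexError on most inputs (A can still return when every short list has its first
-- entry below some leaf's start; B indexes every list up front and raises there).
def Pre_popOneL0TAD (tads : List (List Int)) : Prop := ∀ t ∈ tads, 2 ≤ t.length
instance (tads : List (List Int)) : Decidable (Pre_popOneL0TAD tads) := by
  unfold Pre_popOneL0TAD; infer_instance

def pvWitness_popOneL0TAD : List (List Int) := [[0, 3], [1, 2]]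

def Spec_popOneL0TAD (tads : List (List Int)) (out : Option (List Int × List (List Int))) : Prop :=
  out = popOneL0TAD_alt tads
instance (tads : List (List Int)) (out : Option (List Int × List (List Int))) :
    Decidable (Spec_popOneL0TAD tads out) := by unfold Spec_popOneL0TAD; infer_instance

-- ===== CLAIM (what is proved, stated in full; the proofs are below) =====
def Claim_equal_popOneL0TAD : Prop := ∀ (tads : List (List Int)), Dom_popOneL0TAD tads →
  Pre_popOneL0TAD tads → Spec_popOneL0TAD tads (popOneL0TAD tads)

-- ===== LEMMAS AND PROOFS =====

-- "tad has a strictly nested tad2 in tads": the per-element predicate both programs decide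
def pvNested (tads : List (List Int)) (t : List Int) : Prop :=
  ∃ t2 ∈ tads, pvFst t2 ≥ pvFst t ∧ pvSnd t2 ≤ pvSnd t ∧
    ¬(pvFst t2 = pvFst t ∧ pvSnd t2 = pvSnd t)

-- ----- A's inner loop -----

theorem pvA_nest_eq_filter (tads : List (List Int)) (t : List Int) :
    pvA_nest tads t = tads.filter (fun t2 => decide (pvFst t2 ≥ pvFst t ∧ pvSnd t2 ≤ pvSnd t ∧
      ¬(pvFst t2 = pvFst t ∧ pvSnd t2 = pvSnd t))) := by
  unfold pvA_nest
  have hf : (fun (acc : List (List Int)) tad2 =>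
      if pvFst tad2 ≥ pvFst t ∧ pvSnd tad2 ≤ pvSnd t then
        if pvFst tad2 = pvFst t ∧ pvSnd tad2 = pvSnd t then acc else acc ++ [tad2]
      else acc) = (fun acc t2 =>
      if pvFst t2 ≥ pvFst t ∧ pvSnd t2 ≤ pvSnd t ∧ ¬(pvFst t2 = pvFst t ∧ pvSnd t2 = pvSnd t)
      then acc ++ [t2] else acc) := by
    funext acc x; split_ifs <;> tauto
  rw [hf, PySem.List.foldl_append_ite_eq_filter]; simp

theorem pvA_nest_nil_iff (tads : List (List Int)) (t : List Int) :
    (pvA_nest tads t).length = 0 ↔ ¬ pvNested tads t := by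
  rw [List.length_eq_zero_iff, pvA_nest_eq_filter, List.filter_eq_nil_iff]
  unfold pvNested
  constructor
  · intro h hn
    obtain ⟨t2, ht2, h1, h2, h3⟩ := hn
    have := h t2 ht2
    simp only [decide_eq_true_eq] at this
    exact this ⟨h1, h2, h3⟩
  · intro h t2 ht2
    simp only [decide_eq_true_eq]
    intro hc
    exact h ⟨t2, ht2, hc.1, hc.2.1, hc.2.2⟩

-- ----- B's minEnd dict: per-start minimum end -----

theorem pv_step_get? (d : PySem.Dict Int Int) (t : List Int) (s : Int) :
    ((if d.contains (pvFst t) = false ∨ pvSnd t < d.getD (pvFst t) 0 then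
        d.insert (pvFst t) (pvSnd t) else d).get? s)
    = if pvFst t = s then
        some (match d.get? s with | none => pvSnd t | some m => min m (pvSnd t))
      else d.get? s := by
  by_cases hs : pvFst t = s
  · subst hs
    cases h : d.get? (pvFst t) with
    | none =>
      have hc : d.contains (pvFst t) = false := by
        rw [PySem.Dict.contains_eq_isSome_get?, h]; rfl
      simp [hc, PySem.Dict.get?_insert_self]
    | some m =>
      have hc : d.contains (pvFst t) = true := by
        rw [PySem.Dict.contains_eq_isSome_get?, h]; rfl
      have hd : d.getD (pvFst t) 0 = m := PySem.Dict.getD_of_get?_eq_some d 0 h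
      by_cases hlt : pvSnd t < m
      · rw [if_pos (Or.inr (by rw [hd]; exact hlt)), PySem.Dict.get?_insert_self, if_pos rfl]
        congr 1
        exact (min_eq_right (le_of_lt hlt)).symm
      · have hcond : ¬ (d.contains (pvFst t) = false ∨ pvSnd t < d.getD (pvFst t) 0) := by
          simp [hc, hd, hlt]
        rw [if_neg hcond, if_pos rfl, h]
        congr 1
        exact (min_eq_left (by omega)).symm
  · rw [if_neg hs]
    split
    · exact PySem.Dict.get?_insert_of_ne _ _ (fun h => hs h.symm)
    · rfl

def pvOMin (r : Option Int) (e : Int) : Option Int :=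
  some (match r with | none => e | some m => min m e)

theorem pv_minEnd_fold (l : List (List Int)) : ∀ (d : PySem.Dict Int Int) (s : Int),
    ((l.foldl (fun d t =>
      if d.contains (pvFst t) = false ∨ pvSnd t < d.getD (pvFst t) 0 then
        d.insert (pvFst t) (pvSnd t)
      else d) d).get? s)
    = ((l.filter (fun t => pvFst t == s)).map pvSnd).foldl pvOMin (d.get? s) := by
  induction l with
  | nil => intro d s; rfl
  | cons t l ih =>
    intro d s
    simp only [List.foldl_cons]
    rw [ih, pv_step_get?, List.filter_cons]
    by_cases hs : pvFst t = s
    · simp [hs, pvOMin]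
    · simp [hs]

theorem pv_omin_fold_some (es : List Int) : ∀ r : Int,
    es.foldl pvOMin (some r) = some (es.foldl min r) := by
  induction es with
  | nil => intro r; rfl
  | cons e es ih => intro r; simp [pvOMin, ih]

theorem pvB_minEnd_get?_eq_none_iff (tads : List (List Int)) (s : Int) :
    (pvB_minEnd tads).get? s = none ↔ ∀ t ∈ tads, pvFst t ≠ s := by
  unfold pvB_minEnd
  rw [pv_minEnd_fold, PySem.Dict.get?_empty]
  cases h : tads.filter (fun t => pvFst t == s) with
  | nil =>
    simp only [List.map_nil, List.foldl_nil, true_iff]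
    intro t ht hf
    have : t ∈ tads.filter (fun t => pvFst t == s) := by
      simp [List.mem_filter, ht, hf]
    rw [h] at this; exact absurd this (List.not_mem_nil)
  | cons t l =>
    simp only [List.map_cons, List.foldl_cons]
    constructor
    · intro hn; rw [show pvOMin none (pvSnd t) = some (pvSnd t) from rfl, pv_omin_fold_some] at hn
      exact absurd hn (by simp)
    · intro hall
      have : t ∈ tads.filter (fun t => pvFst t == s) := by rw [h]; exact List.mem_cons_self
      simp only [List.mem_filter, beq_iff_eq] at this
      exact absurd this.2 (hall t this.1)

theorem pvB_minEnd_get?_some (tads : List (List Int)) (s : Int) (m : Int)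
    (h : (pvB_minEnd tads).get? s = some m) :
    (∃ t ∈ tads, pvFst t = s ∧ pvSnd t = m) ∧ (∀ t ∈ tads, pvFst t = s → m ≤ pvSnd t) := by
  have key : ∃ es, es = (tads.filter (fun t => pvFst t == s)).map pvSnd ∧
      es.foldl pvOMin none = some m := by
    refine ⟨_, rfl, ?_⟩
    rw [← h]; unfold pvB_minEnd; rw [pv_minEnd_fold, PySem.Dict.get?_empty]
  obtain ⟨es, hes, hfold⟩ := key
  cases es with
  | nil => exact absurd hfold (by simp)
  | cons e es' =>
    rw [List.foldl_cons, show pvOMin none e = some e from rfl, pv_omin_fold_some] at hfold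
    have hm : es'.foldl min e = m := by injection hfold
    have hmem : m ∈ e :: es' := by
      rcases PySem.List.foldl_min_mem es' e with h1 | h1
      · rw [← hm, h1]; exact List.mem_cons_self
      · rw [← hm]; exact List.mem_cons_of_mem _ h1
    have hle : ∀ y ∈ e :: es', m ≤ y := by
      intro y hy
      rcases List.mem_cons.mp hy with h1 | hy'
      · rw [h1, ← hm]; exact (PySem.List.foldl_min_le es' e).1
      · rw [← hm]; exact (PySem.List.foldl_min_le es' e).2 y hy'
    rw [hes] at hmem hle
    constructor
    · obtain ⟨t, htf, hte⟩ := List.mem_map.mp hmem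
      have := List.mem_filter.mp htf
      exact ⟨t, this.1, by simpa using this.2, hte⟩
    · intro t ht hf
      exact hle (pvSnd t) (List.mem_map.mpr ⟨t, List.mem_filter.mpr ⟨ht, by simp [hf]⟩, rfl⟩)

theorem pvB_minEnd_keys_nodup (tads : List (List Int)) : (pvB_minEnd tads).keys.Nodup := by
  unfold pvB_minEnd
  generalize hd : (PySem.Dict.empty : PySem.Dict Int Int) = d0
  have h0 : d0.keys.Nodup := by rw [← hd]; exact PySem.Dict.nodup_keys_empty
  clear hd
  induction tads generalizing d0 with
  | nil => exact h0
  | cons t l ih =>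
    simp only [List.foldl_cons]
    apply ih
    split
    · exact PySem.Dict.nodup_keys_insert _ _ _ h0
    · exact h0

-- ----- B's suffix dict: minimum end over strictly greater starts -----

def pvRun (minEnd : PySem.Dict Int Int) (r : Option Int) (l : List Int) : Option Int :=
  l.foldl (fun r k => match r with
    | none => some (minEnd.getD k 0)
    | some rr => if minEnd.getD k 0 < rr then some (minEnd.getD k 0) else r) r

theorem pv_suffix_fold_not_mem (M : PySem.Dict Int Int) (ks : List Int) :
    ∀ (st : PySem.Dict Int (Option Int) × Option Int) (s : Int), s ∉ ks →
      ((ks.foldl (pvB_step M) st).1).get? s = st.1.get? s := by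
  induction ks with
  | nil => intro st s _; rfl
  | cons k ks ih =>
    intro st s hs
    rw [List.foldl_cons, ih _ s (fun h => hs (List.mem_cons_of_mem _ h))]
    exact PySem.Dict.get?_insert_of_ne _ _ (fun h => hs (h ▸ List.mem_cons_self))

theorem pvRun_cons (M : PySem.Dict Int Int) (r : Option Int) (k : Int) (l : List Int) :
    pvRun M r (k :: l) = pvRun M (match r with
      | none => some (M.getD k 0)
      | some rr => if M.getD k 0 < rr then some (M.getD k 0) else r) l := by
  cases r <;> rfl

theorem pv_suffix_fold_mem (M : PySem.Dict Int Int) (ks : List Int) :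
    ∀ (st : PySem.Dict Int (Option Int) × Option Int) (s : Int), ks.Nodup → s ∈ ks →
      ((ks.foldl (pvB_step M) st).1).get? s =
        some (pvRun M st.2 (ks.takeWhile (· != s))) := by
  induction ks with
  | nil => intro st s _ hs; exact absurd hs (List.not_mem_nil)
  | cons k ks ih =>
    intro st s hnd hs
    by_cases hk : k = s
    · subst hk
      have hkn : (k != k) = false := by simp
      rw [List.foldl_cons, List.takeWhile_cons, hkn]
      simp only [Bool.false_eq_true, if_false]
      rw [pv_suffix_fold_not_mem M ks _ k (List.nodup_cons.mp hnd).1]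
      show (st.1.insert k st.2).get? k = some st.2
      rw [PySem.Dict.get?_insert_self]
    · have hsk : s ∈ ks := by
        rcases List.mem_cons.mp hs with h | h
        · exact absurd h.symm hk
        · exact h
      have hkn : (k != s) = true := by simpa using hk
      rw [List.foldl_cons, List.takeWhile_cons, hkn]
      simp only [if_true]
      rw [ih _ s (List.nodup_cons.mp hnd).2 hsk, pvRun_cons]
      rfl

theorem pvRun_some_eq (M : PySem.Dict Int Int) (l : List Int) : ∀ r : Int,
    pvRun M (some r) l = some (l.foldl (fun a k => min a (M.getD k 0)) r) := by
  induction l with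
  | nil => intro r; rfl
  | cons k l ih =>
    intro r
    rw [pvRun_cons, List.foldl_cons]
    by_cases h : M.getD k 0 < r
    · simp only [if_pos h]
      rw [ih, min_eq_right (le_of_lt h)]
    · simp only [if_neg h]
      rw [ih, min_eq_left (by omega)]

theorem pvRun_le_iff (M : PySem.Dict Int Int) (l : List Int) (e : Int) :
    (match pvRun M none l with | none => False | some r => r ≤ e) ↔
      ∃ k ∈ l, M.getD k 0 ≤ e := by
  cases l with
  | nil => simp [pvRun]
  | cons k l =>
    rw [pvRun_cons]
    simp only
    rw [pvRun_some_eq]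
    have hmap : l.foldl (fun a k => min a (M.getD k 0)) (M.getD k 0)
        = (l.map (fun k => M.getD k 0)).foldl min (M.getD k 0) := by
      rw [List.foldl_map]
    simp only [hmap]
    constructor
    · intro hle
      rcases PySem.List.foldl_min_mem (l.map (fun k => M.getD k 0)) (M.getD k 0) with h | h
      · exact ⟨k, List.mem_cons_self, by rw [← h]; exact hle⟩
      · obtain ⟨k', hk', he⟩ := List.mem_map.mp h
        exact ⟨k', List.mem_cons_of_mem _ hk', by rw [he]; exact hle⟩
    · rintro ⟨k', hk', hle⟩
      rcases List.mem_cons.mp hk' with h | h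
      · subst h
        exact le_trans (PySem.List.foldl_min_le _ _).1 hle
      · exact le_trans ((PySem.List.foldl_min_le _ _).2 _
          (List.mem_map.mpr ⟨k', h, rfl⟩)) hle

theorem mem_takeWhile_ne_iff (ks : List Int) : ∀ (s k : Int),
    ks.Pairwise (fun a b => b < a) → s ∈ ks →
    ((k ∈ ks.takeWhile (· != s)) ↔ (k ∈ ks ∧ s < k)) := by
  induction ks with
  | nil => intro s k _ hs; exact absurd hs (List.not_mem_nil)
  | cons a t ih =>
    intro s k hp hs
    rcases List.pairwise_cons.mp hp with ⟨ha, hp'⟩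
    by_cases has : a = s
    · subst has
      have : (a != a) = false := by simp
      rw [List.takeWhile_cons, this]
      simp only [Bool.false_eq_true, if_false]
      constructor
      · intro h; exact absurd h (List.not_mem_nil)
      · rintro ⟨hk, hlt⟩
        rcases List.mem_cons.mp hk with h | h
        · omega
        · exact absurd (ha k h) (by omega)
    · have hst : s ∈ t := by
        rcases List.mem_cons.mp hs with h | h
        · exact absurd h.symm has
        · exact h
      have : (a != s) = true := by simpa using has
      rw [List.takeWhile_cons, this]
      simp only [if_true, List.mem_cons]
      rw [ih s k hp' hst]
      constructor
      · rintro (h | ⟨hk, hlt⟩)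
        · exact ⟨Or.inl h, by subst h; exact ha s hst⟩
        · exact ⟨Or.inr hk, hlt⟩
      · rintro ⟨h | h, hlt⟩
        · exact Or.inl h
        · exact Or.inr ⟨h, hlt⟩

-- ----- B's lookups decide exactly pvNested -----

theorem pvNested_iff_B (tads : List (List Int)) (t : List Int) (ht : t ∈ tads) :
    pvNested tads t ↔
      ((pvB_minEnd tads).getD (pvFst t) 0 < pvSnd t ∨
       (match (pvB_suffix (pvB_minEnd tads)).getD (pvFst t) none with
        | none => False | some r => r ≤ pvSnd t)) := by
  set M := pvB_minEnd tads with hM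
  set s := pvFst t with hsdef
  set e := pvSnd t with hedef
  obtain ⟨m, hm⟩ : ∃ m, M.get? s = some m := by
    cases h : M.get? s with
    | none => exact absurd rfl ((pvB_minEnd_get?_eq_none_iff tads s).mp h t ht)
    | some m => exact ⟨m, rfl⟩
  obtain ⟨⟨tw, htw, htws, htwe⟩, hlb⟩ := pvB_minEnd_get?_some tads s m hm
  have hgd : M.getD s 0 = m := PySem.Dict.getD_of_get?_eq_some M 0 hm
  have h1 : M.getD s 0 < e ↔ ∃ t2 ∈ tads, pvFst t2 = s ∧ pvSnd t2 < e := by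
    rw [hgd]
    constructor
    · intro h; exact ⟨tw, htw, htws, by omega⟩
    · rintro ⟨t2, ht2, hf, hl⟩; exact lt_of_le_of_lt (hlb t2 ht2 hf) hl
  set ks := PySem.List.sorted M.keys (fun x => x) true with hks
  have hperm : ks.Perm M.keys := PySem.List.sorted_perm _ _ _
  have hnd : ks.Nodup := (hperm.nodup_iff).mpr (pvB_minEnd_keys_nodup tads)
  have hpw : ks.Pairwise (fun a b => b < a) := by
    have hge := PySem.List.sorted_pairwise_rev M.keys (fun x => x)
    have hne : ks.Pairwise (fun a b => a ≠ b) := hnd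
    exact (hge.and hne).imp (fun h => lt_of_le_of_ne h.1 (Ne.symm h.2))
  have hmemkeys : ∀ k : Int, k ∈ ks ↔ M.contains k = true := by
    intro k
    rw [PySem.Dict.contains_iff_mem_keys]
    exact ⟨fun h => hperm.mem_iff.mp h, fun h => hperm.mem_iff.mpr h⟩
  have hsks : s ∈ ks := by
    rw [hmemkeys, PySem.Dict.contains_eq_isSome_get?, hm]; rfl
  have hsufget : (pvB_suffix M).get? s = some (pvRun M none (ks.takeWhile (· != s))) :=
    pv_suffix_fold_mem M ks (PySem.Dict.empty, none) s hnd hsks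
  have hsufgd : (pvB_suffix M).getD s none = pvRun M none (ks.takeWhile (· != s)) :=
    PySem.Dict.getD_of_get?_eq_some _ none hsufget
  have h2 : (match (pvB_suffix M).getD s none with | none => False | some r => r ≤ e) ↔
      ∃ t2 ∈ tads, s < pvFst t2 ∧ pvSnd t2 ≤ e := by
    rw [hsufgd, pvRun_le_iff]
    constructor
    · rintro ⟨k, hk, hle⟩
      have hk' := (mem_takeWhile_ne_iff ks s k hpw hsks).mp hk
      have hc : M.contains k = true := (hmemkeys k).mp hk'.1
      obtain ⟨mk, hmk⟩ : ∃ mk, M.get? k = some mk := by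
        cases h : M.get? k with
        | none => rw [PySem.Dict.get?_eq_none_iff_contains] at h; rw [hc] at h; cases h
        | some mk => exact ⟨mk, rfl⟩
      obtain ⟨⟨t2, ht2, ht2f, ht2e⟩, _⟩ := pvB_minEnd_get?_some tads k mk hmk
      have : M.getD k 0 = mk := PySem.Dict.getD_of_get?_eq_some M 0 hmk
      exact ⟨t2, ht2, ht2f ▸ hk'.2, by omega⟩
    · rintro ⟨t2, ht2, hgt, hle⟩
      set k := pvFst t2 with hkdef
      obtain ⟨mk, hmk⟩ : ∃ mk, M.get? k = some mk := by
        cases h : M.get? k with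
        | none => exact absurd rfl ((pvB_minEnd_get?_eq_none_iff tads k).mp h t2 ht2)
        | some mk => exact ⟨mk, rfl⟩
      have hkks : k ∈ ks := by
        rw [hmemkeys, PySem.Dict.contains_eq_isSome_get?, hmk]; rfl
      refine ⟨k, (mem_takeWhile_ne_iff ks s k hpw hsks).mpr ⟨hkks, hgt⟩, ?_⟩
      have hgdk : M.getD k 0 = mk := PySem.Dict.getD_of_get?_eq_some M 0 hmk
      have := (pvB_minEnd_get?_some tads k mk hmk).2 t2 ht2 rfl
      omega
  rw [h1, h2]
  unfold pvNested
  constructor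
  · rintro ⟨t2, ht2, hge, hle, hne⟩
    by_cases hfs : pvFst t2 = s
    · refine Or.inl ⟨t2, ht2, hfs, ?_⟩
      have hne' : ¬(pvSnd t2 = pvSnd t) := fun h => hne ⟨by omega, h⟩
      omega
    · exact Or.inr ⟨t2, ht2, by omega, hle⟩
  · rintro (⟨t2, ht2, hf, hl⟩ | ⟨t2, ht2, hg, hl⟩)
    · exact ⟨t2, ht2, by omega, by omega, by rintro ⟨hc1, hc2⟩; omega⟩
    · exact ⟨t2, ht2, by omega, hl, by rintro ⟨hc1, hc2⟩; omega⟩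

-- ----- the two scans agree -----

theorem loops_eq (tads : List (List Int)) :
    ∀ cur, (∀ t ∈ cur, t ∈ tads) →
      pvA_loop tads cur = pvB_scan tads (pvB_minEnd tads) (pvB_suffix (pvB_minEnd tads)) cur := by
  intro cur
  induction cur with
  | nil => intro _; rfl
  | cons t rest ih =>
    intro hmem
    have ht : t ∈ tads := hmem t List.mem_cons_self
    have hiff := pvNested_iff_B tads t ht
    have hbool : ((decide ((pvB_minEnd tads).getD (pvFst t) 0 < pvSnd t) ||
        (match (pvB_suffix (pvB_minEnd tads)).getD (pvFst t) none with
         | none => false | some r => decide (r ≤ pvSnd t))) = true) ↔ pvNested tads t := by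
      rw [hiff]
      cases h : (pvB_suffix (pvB_minEnd tads)).getD (pvFst t) none <;> simp
    rw [pvA_loop, pvB_scan]
    by_cases hn : pvNested tads t
    · rw [if_neg (fun h0 => ((pvA_nest_nil_iff tads t).mp h0) hn), if_pos (hbool.mpr hn)]
      exact ih (fun x hx => hmem x (List.mem_cons_of_mem _ hx))
    · rw [if_pos ((pvA_nest_nil_iff tads t).mpr hn),
        if_neg (fun h0 => hn (hbool.mp h0))]

-- ===== VERDICT (by name: the statement is the Claim_ definition above) =====
theorem popOneL0TAD_spec : Claim_equal_popOneL0TAD := by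
  intro tads _ _
  unfold Spec_popOneL0TAD popOneL0TAD popOneL0TAD_alt
  exact loops_eq tads tads (fun t ht => ht)
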